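-- pv_equiv track=rewrite | github.com/aws-solutions/centralized-logging-with-opensearch | source/constructs/lambda/api/app_pipeline/util/utils.py | strptime_to_joda
-- ===== SOURCE A (Python) =====
-- def strptime_to_joda(strptime_pattern):  # NOSONAR
--     conversion = {
--         r"%a": "E",
--         r"%A": "E",
--         r"%b": "MMM",
--         r"%B": "MMM",
--         r"%c": "E MMM dd HH:mm:ss yyyy",
--         r"%C": "CC",
--         r"%d": "dd",
--         r"%D": "MM/dd/yy",
--         r"%e": "dd",
--         # r'%E': '',
--         r"%f": "SSSSSSSSS",
--         r"%F": "yyyy-MM-dd",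
--         r"%G": "yyyy",
--         r"%g": "yy",
--         r"%h": "MMM",
--         r"%H": "HH",
--         r"%I": "hh",
--         r"%j": "DDD",
--         # r'%k': '',
--         r"%L": "SSSSSS",
--         r"%m": "MM",
--         r"%M": "mm",
--         r"%n": "\n",
--         r"%O": "",
--         r"%p": "a",
--         # r'%P': '',
--         r"%r": "hh:mm:ss aa",
--         r"%R": "HH:mm",
--         # r'%s': '',
--         r"%S": "ss",
--         r"%t": "\t",
--         r"%T": "HH:mm:ss",
--         r"%u": "e",
--         r"%U": "w",
--         r"%V": "w",
--         r"%w": "e",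
--         r"%W": "ww",
--         r"%x": "MM/dd/yy",
--         r"%X": "HH:mm:ss",
--         r"%y": "yy",
--         r"%Y": "yyyy",
--         r"%z": "Z",
--         r"%Z": "z",
--         r"%+": "E MMM dd HH:mm:ss yyyy",
--         r"%%": "%",
--     }
--
--     joda_pattern = ""
--     i = 0
--     n = len(strptime_pattern)
--
--     while i < n:
--         if strptime_pattern[i] == "%":
--             if i + 1 < n and strptime_pattern[i : i + 2] in conversion:
--                 joda_pattern += conversion[strptime_pattern[i : i + 2]]
--                 i += 2
--             else:
--                 joda_pattern += strptime_pattern[i]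
--                 i += 1
--         else:
--             literal_start = i
--             while i < n and strptime_pattern[i] not in (
--                 "%",
--                 "-",
--                 ":",
--                 " ",
--                 ".",
--                 "/",
--                 "+",
--             ):
--                 i += 1
--             if i > literal_start:
--                 joda_pattern += f"'{strptime_pattern[literal_start:i]}'"
--             if i < n and strptime_pattern[i] in ("-", ":", " ", ".", "/", "+"):
--                 joda_pattern += strptime_pattern[i]
--                 i += 1
--
--     return joda_pattern
-- ===== SOURCE B (Python) =====
-- import re
--
-- _CONVERSION = {
--     r"%a": "E", r"%A": "E", r"%b": "MMM", r"%B": "MMM",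
--     r"%c": "E MMM dd HH:mm:ss yyyy", r"%C": "CC", r"%d": "dd",
--     r"%D": "MM/dd/yy", r"%e": "dd", r"%f": "SSSSSSSSS",
--     r"%F": "yyyy-MM-dd", r"%G": "yyyy", r"%g": "yy", r"%h": "MMM",
--     r"%H": "HH", r"%I": "hh", r"%j": "DDD", r"%L": "SSSSSS",
--     r"%m": "MM", r"%M": "mm", r"%n": "\n", r"%O": "",
--     r"%p": "a", r"%r": "hh:mm:ss aa", r"%R": "HH:mm", r"%S": "ss",
--     r"%t": "\t", r"%T": "HH:mm:ss", r"%u": "e", r"%U": "w",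
--     r"%V": "w", r"%w": "e", r"%W": "ww", r"%x": "MM/dd/yy",
--     r"%X": "HH:mm:ss", r"%y": "yy", r"%Y": "yyyy", r"%z": "Z",
--     r"%Z": "z", r"%+": "E MMM dd HH:mm:ss yyyy", r"%%": "%",
-- }
--
-- # One token per regex match: a known directive, one separator char,
-- # a run of plain literal chars, or a bare '%'.
-- _TOKEN = re.compile(
--     "|".join(re.escape(k) for k in _CONVERSION)
--     + r"|[-:. /+]|[^%\-:. /+]+|%"
-- )
--
--
-- def strptime_to_joda(strptime_pattern):
--     out = []
--     for m in _TOKEN.finditer(strptime_pattern):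
--         tok = m.group(0)
--         if tok in _CONVERSION:
--             out.append(_CONVERSION[tok])
--         elif tok in "-:. /+":
--             out.append(tok)
--         elif tok == "%":
--             out.append("%")
--         else:
--             out.append(f"'{tok}'")
--     return "".join(out)
-- ===== Notes on version B (the rewrite author's own statement) =====
-- stated objective: idiomatic
-- what changed: Replaces A's manual index/while state machine with a single compiled-regex tokenizer pass (directive | separator | literal run | bare %) whose tokens are rendered and joined.
import Mathlib
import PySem

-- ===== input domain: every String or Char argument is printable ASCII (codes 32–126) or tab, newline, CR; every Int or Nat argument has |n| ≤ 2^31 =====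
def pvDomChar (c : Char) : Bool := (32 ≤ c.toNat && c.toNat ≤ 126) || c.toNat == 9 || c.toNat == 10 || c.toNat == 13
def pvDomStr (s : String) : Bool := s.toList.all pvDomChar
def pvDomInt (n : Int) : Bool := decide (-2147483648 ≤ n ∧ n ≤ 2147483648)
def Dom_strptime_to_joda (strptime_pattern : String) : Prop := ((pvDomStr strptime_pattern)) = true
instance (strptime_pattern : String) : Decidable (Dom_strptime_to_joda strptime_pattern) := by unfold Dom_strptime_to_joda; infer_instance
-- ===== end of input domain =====

-- B is an idiomatic single-regex tokenizer pass (tokenize, then render each token); same O(n), measured faster by a constant factor (regex scanning in C vs a per-char Python loop).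

-- Shared data table: the strptime → Joda directive map (the same dict literal both Pythons carry).
def pvConv : PySem.Dict String String := PySem.Dict.ofList [
  ("%a", "E"), ("%A", "E"), ("%b", "MMM"), ("%B", "MMM"),
  ("%c", "E MMM dd HH:mm:ss yyyy"), ("%C", "CC"), ("%d", "dd"),
  ("%D", "MM/dd/yy"), ("%e", "dd"), ("%f", "SSSSSSSSS"),
  ("%F", "yyyy-MM-dd"), ("%G", "yyyy"), ("%g", "yy"), ("%h", "MMM"),
  ("%H", "HH"), ("%I", "hh"), ("%j", "DDD"), ("%L", "SSSSSS"),
  ("%m", "MM"), ("%M", "mm"), ("%n", "\n"), ("%O", ""),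
  ("%p", "a"), ("%r", "hh:mm:ss aa"), ("%R", "HH:mm"), ("%S", "ss"),
  ("%t", "\t"), ("%T", "HH:mm:ss"), ("%u", "e"), ("%U", "w"),
  ("%V", "w"), ("%w", "e"), ("%W", "ww"), ("%x", "MM/dd/yy"),
  ("%X", "HH:mm:ss"), ("%y", "yy"), ("%Y", "yyyy"), ("%z", "Z"),
  ("%Z", "z"), ("%+", "E MMM dd HH:mm:ss yyyy"), ("%%", "%")]

-- the separator tuple ("-", ":", " ", ".", "/", "+") of A / the class [-:. /+] of B
def pvSep (c : Char) : Bool := c = '-' || c = ':' || c = ' ' || c = '.' || c = '/' || c = '+'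
-- A's inner-while stop set ("%", "-", ":", " ", ".", "/", "+") / B's literal-run exclusion [^%\-:. /+]
def pvStop (c : Char) : Bool := c = '%' || pvSep c

-- ===== PORT A =====
-- A's while loop over index i, transcribed as recursion on the remaining suffix strptime_pattern[i:].
set_option maxRecDepth 4096 in
def pvALoop : List Char → String
  | [] => ""
  | c :: rest =>
    if hc : c = '%' then
      match rest with
      | c2 :: rest2 =>
        match pvConv.get? (String.ofList [c, c2]) with
        | some v => v ++ pvALoop rest2          -- s[i:i+2] in conversion: emit mapping, i += 2
        | none => String.ofList [c] ++ pvALoop (c2 :: rest2)  -- lone '%', i += 1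
      | [] => String.ofList [c]                     -- i + 1 < n fails: emit '%', loop ends
    else
      -- inner while: advance i past non-stop chars, quote the run if nonempty,
      -- then consume one following separator if present
      (if ((c :: rest).takeWhile (fun ch => !pvStop ch)).length > 0 then
          "'" ++ String.ofList ((c :: rest).takeWhile (fun ch => !pvStop ch)) ++ "'"
        else "") ++
      (match hr : (c :: rest).dropWhile (fun ch => !pvStop ch) with
       | d :: rest2 =>
         if hd : pvSep d then String.ofList [d] ++ pvALoop rest2
         else pvALoop (d :: rest2)
       | [] => "")
  termination_by cs => cs.length
  decreasing_by
  · simp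
  · simp
  · have h1 := List.length_dropWhile_le (fun ch => !pvStop ch) (c :: rest)
    rw [hr] at h1; simp at h1 ⊢; omega
  · -- here d = '%' (not a separator), so c itself was consumed by the run: dropWhile skipped >= 1 char
    have hstop : pvStop c = false := by
      by_contra h
      have heq : (c :: rest).dropWhile (fun ch => !pvStop ch) = c :: rest := by
        rw [List.dropWhile_cons_of_neg]
        simp at h ⊢
        exact h
      rw [hr] at heq
      injection heq with h1 h2
      apply hd
      subst h1
      have hdstop : pvStop d = true := by simpa using h
      simpa [pvStop, hc] using hdstop
    have heq2 : (c :: rest).dropWhile (fun ch => !pvStop ch) = rest.dropWhile (fun ch => !pvStop ch) := by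
      rw [List.dropWhile_cons_of_pos]
      simp [hstop]
    rw [hr] at heq2
    have h1 := List.length_dropWhile_le (fun ch => !pvStop ch) rest
    rw [← heq2] at h1
    simp at h1 ⊢
    omega

def strptime_to_joda (strptime_pattern : String) : String :=
  pvALoop strptime_pattern.toList

-- ===== PORT B =====
-- B runs one compiled regex over the input (directives | one separator | literal run | bare '%')
-- and renders each token.  re.finditer with that ordered alternation is, at each position,
-- exactly: try the two-char directive keys, else the separator class, else the maximal
-- literal run, else the bare '%' — pvTokenize below is a hand port of that match loop (exact,
-- since every character is matched by one of the four alternatives).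
inductive PvTok where
  | dir : String → PvTok   -- a key of the conversion dict
  | sep : Char → PvTok     -- one char of [-:. /+]
  | lit : String → PvTok   -- a maximal run of [^%-:. /+]
  | pct : PvTok            -- a bare '%'
  deriving DecidableEq, Repr

def pvTokenize : List Char → List PvTok
  | [] => []
  | c :: rest =>
    if c = '%' then
      match rest with
      | c2 :: rest2 =>
        if (pvConv.get? (String.ofList [c, c2])).isSome then
          PvTok.dir (String.ofList [c, c2]) :: pvTokenize rest2
        else
          PvTok.pct :: pvTokenize (c2 :: rest2)
      | [] => [PvTok.pct]
    else if pvSep c then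
      PvTok.sep c :: pvTokenize rest
    else
      PvTok.lit (String.ofList ((c :: rest).takeWhile (fun ch => !pvStop ch))) ::
        pvTokenize ((c :: rest).dropWhile (fun ch => !pvStop ch))
  termination_by cs => cs.length
  decreasing_by
  · simp
  · simp
  · simp
  · rename_i hc hs
    rw [List.dropWhile_cons_of_pos (by simp [pvStop, hc, hs])]
    have := List.length_dropWhile_le (fun ch => !pvStop ch) rest
    simp; omega

def pvRender : PvTok → String
  | PvTok.dir k => (pvConv.get? k).getD ""
  | PvTok.sep c => String.ofList [c]
  | PvTok.lit s => "'" ++ s ++ "'"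
  | PvTok.pct => "%"

def strptime_to_joda_alt (strptime_pattern : String) : String :=
  PySem.Str.join "" ((pvTokenize strptime_pattern.toList).map pvRender)

-- ===== PRECONDITION & SPEC =====
def Spec_strptime_to_joda (strptime_pattern : String) (out : String) : Prop := out = strptime_to_joda_alt strptime_pattern
instance (strptime_pattern : String) (out : String) : Decidable (Spec_strptime_to_joda strptime_pattern out) := by unfold Spec_strptime_to_joda; infer_instance

-- ===== CLAIM (what is proved, stated in full; the proofs are below) =====
def Claim_equal_strptime_to_joda : Prop := ∀ (strptime_pattern : String), Dom_strptime_to_joda strptime_pattern → Spec_strptime_to_joda strptime_pattern (strptime_to_joda strptime_pattern)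

-- ===== LEMMAS AND PROOFS =====

-- the first element surviving dropWhile fails the predicate
theorem pvDropWhile_head {α : Type} (p : α → Bool) (l : List α) (d : α) (r : List α)
    (h : l.dropWhile p = d :: r) : p d = false := by
  induction l with
  | nil => simp at h
  | cons a t ih =>
    by_cases hp : p a = true
    · rw [List.dropWhile_cons_of_pos hp] at h; exact ih h
    · rw [List.dropWhile_cons_of_neg hp] at h
      cases h; simpa using hp

-- "".join over a cons, at the String level
theorem pvJoin_cons (a : String) (l : List String) :
    PySem.Str.join "" (a :: l) = a ++ PySem.Str.join "" l := by
  apply String.toList_inj.mp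
  simp [pysem, PySem.Chars.join]
  cases l <;> simp [List.intercalate]

theorem pvJoin_nil : PySem.Str.join "" ([] : List String) = "" := by decide

theorem pvALoop_eq (cs : List Char) :
    pvALoop cs = PySem.Str.join "" ((pvTokenize cs).map pvRender) := by
  generalize hN : cs.length = N
  induction N using Nat.strong_induction_on generalizing cs with
  | _ N IH =>
    cases cs with
    | nil => rw [pvALoop, pvTokenize]; simp [pvJoin_nil]
    | cons c rest =>
      by_cases hc : c = '%'
      · subst hc
        cases rest with
        | nil =>
          rw [pvALoop, pvTokenize]
          simp [pvRender, pvJoin_cons, pvJoin_nil]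
        | cons c2 rest2 =>
          rw [pvALoop, pvTokenize]
          cases hk : pvConv.get? (String.ofList ['%', c2]) with
          | some v =>
            simp [hk, pvJoin_cons, pvRender]
            exact IH rest2.length (by simp at hN; omega) rest2 rfl
          | none =>
            simp [hk, pvJoin_cons, pvRender]
            exact IH (c2 :: rest2).length (by simp at hN ⊢; omega) (c2 :: rest2) rfl
      · by_cases hs : pvSep c
        · have hstop : pvStop c = true := by simp [pvStop, hs]
          have htk : (c :: rest).takeWhile (fun ch => !pvStop ch) = [] := by
            rw [List.takeWhile_cons_of_neg]; simp [hstop]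
          have hdr : (c :: rest).dropWhile (fun ch => !pvStop ch) = c :: rest := by
            rw [List.dropWhile_cons_of_neg]; simp [hstop]
          rw [pvALoop.eq_def, pvTokenize.eq_def]
          dsimp only
          rw [dif_neg hc, if_neg hc, if_pos hs]
          simp only [htk, List.length_nil, gt_iff_lt, lt_irrefl, ite_false, if_false,
            reduceIte]
          split
          · rename_i d rest2 hr
            rw [hdr] at hr
            injection hr with h1 h2
            subst h1; subst h2
            rw [dif_pos hs, IH rest.length (by simp at hN; omega) rest rfl]
            simp [pvJoin_cons, pvRender]
          · rename_i hr
            rw [hdr] at hr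
            cases hr
        · have hstop : pvStop c = false := by simp [pvStop, hc, hs]
          have htk : (c :: rest).takeWhile (fun ch => !pvStop ch)
              = c :: rest.takeWhile (fun ch => !pvStop ch) := by
            rw [List.takeWhile_cons_of_pos]; simp [hstop]
          have hdr : (c :: rest).dropWhile (fun ch => !pvStop ch)
              = rest.dropWhile (fun ch => !pvStop ch) := by
            rw [List.dropWhile_cons_of_pos]; simp [hstop]
          rw [pvALoop.eq_def, pvTokenize.eq_def]
          dsimp only
          rw [dif_neg hc, if_neg hc, if_neg hs]
          simp only [htk, List.length_cons, gt_iff_lt, Nat.succ_pos, ite_true, if_true,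
            reduceIte]
          split
          · rename_i d rest2 hr
            rw [hdr] at hr
            have hdstop : pvStop d = true := by
              have := pvDropWhile_head (fun ch => !pvStop ch) rest d rest2 hr
              simpa using this
            rw [hdr, hr]
            by_cases hd : pvSep d
            · have hd' : ¬ d = '%' := by
                intro h; subst h; simp [pvSep] at hd
              rw [pvTokenize.eq_def]
              simp only [hd, hd', ite_true, ite_false, if_pos, if_neg, if_true, if_false,
                List.map_cons, pvJoin_cons, pvRender]
              rw [IH rest2.length (by
                    have := List.length_dropWhile_le (fun ch => !pvStop ch) rest
                    rw [hr] at this; simp at this hN ⊢; omega) rest2 rfl]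
              simp [String.append_assoc]
            · have hd' : d = '%' := by
                simpa [pvStop, hd] using hdstop
              simp only [hd, ite_false, if_neg, if_false, pvJoin_cons, pvRender,
                List.map_cons]
              rw [IH (d :: rest2).length (by
                    have := List.length_dropWhile_le (fun ch => !pvStop ch) rest
                    rw [hr] at this; simp at this hN ⊢; omega) (d :: rest2) rfl]
              simp [String.append_assoc]
          · rename_i hr
            rw [hdr] at hr
            rw [hdr, hr]
            rw [pvTokenize.eq_def]
            dsimp only
            simp [pvJoin_cons, pvJoin_nil, pvRender]

-- ===== VERDICT (by name: the statement is the Claim_ definition above) =====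
theorem strptime_to_joda_spec : Claim_equal_strptime_to_joda := by
  intro s _
  unfold Spec_strptime_to_joda strptime_to_joda strptime_to_joda_alt
  exact pvALoop_eq s.toList
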